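-- pv_equiv track=rewrite | github.com/gremenne/dol_advent_of_code_hacking | dol_hacking/day2/day2.py | process_data1
-- ===== SOURCE A (Python) =====
-- import collections
--
-- def process_line1(line):
--     counts = collections.Counter(line).values()
--     return 2 in counts, 3 in counts
--
-- def process_data1(data):
--     duplicates = 0
--     triplicates = 0
--     for line in data:
--         duplicate, triplicate = process_line1(line)
--
--         if duplicate:
--             duplicates += 1
--
--         if triplicate:
--             triplicates += 1
--
--     return duplicates * triplicates
-- ===== SOURCE B (Python) =====
-- def process_data1(data):
--     duplicates = 0
--     triplicates = 0
--     for line in data: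
--         has2 = False
--         has3 = False
--         prev = None
--         run = 0
--         for ch in sorted(line):
--             if ch == prev:
--                 run += 1
--             else:
--                 if run == 2:
--                     has2 = True
--                 if run == 3:
--                     has3 = True
--                 prev = ch
--                 run = 1
--         if run == 2:
--             has2 = True
--         if run == 3:
--             has3 = True
--         if has2:
--             duplicates += 1
--         if has3:
--             triplicates += 1
--     return duplicates * triplicates
-- ===== Notes on version B (the rewrite author's own statement) =====
-- stated objective: alternative
-- what changed: Replaces A's per-line frequency Counter with a values-membership test by sorting each line and scanning consecutive runs once, flagging a run of length exactly 2 or 3; no Counter, no helper, explicit prev/run state.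
import Mathlib
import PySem

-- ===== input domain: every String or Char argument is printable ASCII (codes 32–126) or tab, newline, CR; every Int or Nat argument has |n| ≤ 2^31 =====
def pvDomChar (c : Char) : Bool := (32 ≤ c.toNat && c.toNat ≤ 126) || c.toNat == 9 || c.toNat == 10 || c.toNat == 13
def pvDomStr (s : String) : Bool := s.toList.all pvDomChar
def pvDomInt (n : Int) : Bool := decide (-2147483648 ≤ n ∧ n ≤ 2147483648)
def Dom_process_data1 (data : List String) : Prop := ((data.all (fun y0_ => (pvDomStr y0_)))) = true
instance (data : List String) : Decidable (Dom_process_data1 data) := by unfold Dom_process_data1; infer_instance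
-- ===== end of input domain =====

-- B replaces A's per-line Counter lookup by a sort-then-run-length scan per line; objective: alternative.
-- ===== PORT A =====
def process_line1 (line : String) : Bool × Bool :=
  let counts := (PySem.Dict.counter line.toList).values
  (counts.contains 2, counts.contains 3)

def process_data1 (data : List String) : Int :=
  let r := data.foldl (fun (acc : Int × Int) line =>
      let dt := process_line1 line
      (if dt.1 then acc.1 + 1 else acc.1, if dt.2 then acc.2 + 1 else acc.2)) (0, 0)
  r.1 * r.2

-- ===== PORT B =====
-- inner-loop body of Source B: state (prev, run, has2, has3); sorted(line) iterates the
-- line's characters in code-point order (exact: Python orders 1-char strings by code point)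
def bStep (st : Option Char × Int × Bool × Bool) (ch : Char) : Option Char × Int × Bool × Bool :=
  if st.1 == some ch then (st.1, st.2.1 + 1, st.2.2.1, st.2.2.2)
  else (some ch, 1, st.2.2.1 || (st.2.1 == 2), st.2.2.2 || (st.2.1 == 3))

def process_data1_alt (data : List String) : Int :=
  let r := data.foldl (fun (acc : Int × Int) line =>
      let st := (PySem.List.sorted line.toList (fun c => c) false).foldl bStep (none, 0, false, false)
      let has2 := st.2.2.1 || (st.2.1 == 2)
      let has3 := st.2.2.2 || (st.2.1 == 3)
      (if has2 then acc.1 + 1 else acc.1, if has3 then acc.2 + 1 else acc.2)) (0, 0)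
  r.1 * r.2

-- ===== PRECONDITION & SPEC =====
def Spec_process_data1 (data : List String) (out : Int) : Prop := out = process_data1_alt data
instance (data : List String) (out : Int) : Decidable (Spec_process_data1 data out) := by unfold Spec_process_data1; infer_instance

-- ===== CLAIM (what is proved, stated in full; the proofs are below) =====
def Claim_equal_process_data1 : Prop := ∀ (data : List String), Dom_process_data1 data → Spec_process_data1 data (process_data1 data)

-- ===== LEMMAS AND PROOFS =====
-- A's membership test on Counter(line).values() is "some character occurs exactly k times"
theorem contains_counter_values_iff (l : List Char) (k : Int) :
    ((PySem.Dict.counter l).values.contains k) = decide (∃ c ∈ l, (l.count c : Int) = k) := by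
  have hv : (PySem.Dict.counter l).values
      = (PySem.Set.ofList l).map (fun c => (l.count c : Int)) := by
    have := PySem.Dict.items_counter (xs := l)
    simp only [PySem.Dict.values, this, List.map_map]
    rfl
  rw [Bool.eq_iff_iff]
  simp only [hv, List.contains_eq_mem, List.mem_map, decide_eq_true_eq]
  constructor
  · rintro ⟨c, hc, hk⟩
    exact ⟨c, (PySem.Set.mem_ofList l c).mp hc, hk⟩
  · rintro ⟨c, hc, hk⟩
    exact ⟨c, (PySem.Set.mem_ofList l c).mpr hc, hk⟩

-- the run-length scan over a sorted remainder l, having already seen r copies of c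
theorem scan_run (l : List Char) : ∀ (c : Char) (r : Int) (h2 h3 : Bool),
    (c :: l).Pairwise (· ≤ ·) →
    (let st := l.foldl bStep (some c, r, h2, h3);
     ((st.2.2.1 || (st.2.1 == 2)), (st.2.2.2 || (st.2.1 == 3))))
    = (h2 || decide (r + (l.count c : Int) = 2) || decide (∃ d ∈ l, d ≠ c ∧ (l.count d : Int) = 2),
       h3 || decide (r + (l.count c : Int) = 3) || decide (∃ d ∈ l, d ≠ c ∧ (l.count d : Int) = 3)) := by
  induction l with
  | nil =>
    intro c r h2 h3 _
    simp [Bool.beq_eq_decide_eq]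
  | cons x xs ih =>
    intro c r h2 h3 hp
    by_cases hx : x = c
    · subst hx
      simp only [List.foldl_cons, bStep]
      have hb : ((some x : Option Char) == some x) = true := by simp
      rw [if_pos hb]
      have hp' : (x :: xs).Pairwise (· ≤ ·) := hp.sublist (List.sublist_cons_self _ _)
      rw [ih x (r + 1) h2 h3 hp']
      have hc : ∀ k : Int, decide ((r + 1) + (xs.count x : Int) = k)
          = decide (r + ((x :: xs).count x : Int) = k) := by
        intro k; rw [decide_eq_decide]; simp [List.count_cons_self]; omega
      have he : ∀ k : Int, decide (∃ d ∈ xs, d ≠ x ∧ (xs.count d : Int) = k)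
          = decide (∃ d ∈ x :: xs, d ≠ x ∧ ((x :: xs).count d : Int) = k) := by
        intro k; rw [decide_eq_decide]
        constructor
        · rintro ⟨d, hd, hne, hk⟩
          exact ⟨d, List.mem_cons_of_mem _ hd, hne, by rwa [List.count_cons_of_ne (by exact fun h => hne h.symm)]⟩
        · rintro ⟨d, hd, hne, hk⟩
          rcases List.mem_cons.mp hd with h | h
          · exact absurd h hne
          · exact ⟨d, h, hne, by rwa [List.count_cons_of_ne (by exact fun h => hne h.symm)] at hk⟩
      rw [hc 2, hc 3, he 2, he 3]
    · simp only [List.foldl_cons, bStep]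
      have hb : ((some c : Option Char) == some x) = false := by
        simp; exact fun h => hx h.symm
      rw [if_neg (by simp [hb])]
      have hp' : (x :: xs).Pairwise (· ≤ ·) := hp.tail
      rw [ih x 1 (h2 || (r == 2)) (h3 || (r == 3)) hp']
      -- c is strictly below every element of x :: xs, so it never occurs there
      have hclt : ∀ d ∈ x :: xs, c < d := by
        intro d hd
        have hle : c ≤ d := (List.pairwise_cons.mp hp).1 d hd
        rcases List.mem_cons.mp hd with h | h
        · subst h; exact lt_of_le_of_ne hle (fun h => hx h.symm)
        · have hxd : x ≤ d := (List.pairwise_cons.mp hp').1 d h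
          have hcx : c ≤ x := (List.pairwise_cons.mp hp).1 x (List.mem_cons_self)
          exact lt_of_lt_of_le (lt_of_le_of_ne hcx (fun h => hx h.symm)) hxd
      have hc0 : (x :: xs).count c = 0 := by
        rw [List.count_eq_zero]
        exact fun hmem => absurd rfl (ne_of_gt (hclt c hmem))
      have hrc : ∀ k : Int, decide (r + ((x :: xs).count c : Int) = k) = (r == k) := by
        intro k; rw [hc0, Bool.beq_eq_decide_eq, decide_eq_decide]; omega
      have hsplit : ∀ k : Int,
          (decide ((1 : Int) + (xs.count x : Int) = k) || decide (∃ d ∈ xs, d ≠ x ∧ (xs.count d : Int) = k))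
          = decide (∃ d ∈ x :: xs, d ≠ c ∧ ((x :: xs).count d : Int) = k) := by
        intro k
        rw [Bool.eq_iff_iff]
        simp only [Bool.or_eq_true, decide_eq_true_eq]
        constructor
        · rintro (h | ⟨d, hd, hne, hk⟩)
          · refine ⟨x, List.mem_cons_self, fun h' => hx h', ?_⟩
            rw [List.count_cons_self]; push_cast; omega
          · refine ⟨d, List.mem_cons_of_mem _ hd, ne_of_gt (hclt d (List.mem_cons_of_mem _ hd)), ?_⟩
            rwa [List.count_cons_of_ne (fun h => hne h.symm)]
        · rintro ⟨d, hd, _, hk⟩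
          by_cases hdx : d = x
          · subst hdx; left; rw [List.count_cons_self] at hk; push_cast at hk ⊢; omega
          · rcases List.mem_cons.mp hd with h | h
            · exact absurd h hdx
            · right; exact ⟨d, h, hdx, by rwa [List.count_cons_of_ne (fun h => hdx h.symm)] at hk⟩
      rw [hrc 2, hrc 3, ← hsplit 2, ← hsplit 3]
      simp only [Prod.mk.injEq]
      constructor <;> rw [Bool.eq_iff_iff] <;> simp <;> tauto

-- per line, B's sorted run-length flags equal A's Counter flags
theorem lineFlags_eq (line : String) :
    (let st := (PySem.List.sorted line.toList (fun c => c) false).foldl bStep (none, 0, false, false);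
     ((st.2.2.1 || (st.2.1 == 2)), (st.2.2.2 || (st.2.1 == 3)))) = process_line1 line := by
  have hperm : (PySem.List.sorted line.toList (fun c => c) false).Perm line.toList :=
    PySem.List.sorted_perm _ _ _
  have hpw : (PySem.List.sorted line.toList (fun c => c) false).Pairwise (· ≤ ·) :=
    PySem.List.sorted_pairwise line.toList (fun c => c)
  have hA : process_line1 line
      = (decide (∃ c ∈ line.toList, (line.toList.count c : Int) = 2),
         decide (∃ c ∈ line.toList, (line.toList.count c : Int) = 3)) := by
    simp only [process_line1, contains_counter_values_iff]
  rw [hA]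
  have hex : ∀ k : Int, (∃ c ∈ line.toList, (line.toList.count c : Int) = k)
      ↔ (∃ c ∈ PySem.List.sorted line.toList (fun c => c) false,
           ((PySem.List.sorted line.toList (fun c => c) false).count c : Int) = k) := by
    intro k
    constructor
    · rintro ⟨c, hc, hk⟩
      exact ⟨c, hperm.mem_iff.mpr hc, by rwa [hperm.count_eq]⟩
    · rintro ⟨c, hc, hk⟩
      exact ⟨c, hperm.mem_iff.mp hc, by rwa [hperm.count_eq] at hk⟩
  simp only [decide_eq_decide.mpr (hex 2), decide_eq_decide.mpr (hex 3)]
  generalize hs : PySem.List.sorted line.toList (fun c => c) false = s at hpw ⊢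
  match s with
  | [] => simp
  | c :: rest =>
    simp only [List.foldl_cons, bStep]
    have hb : ((none : Option Char) == some c) = false := by simp
    rw [if_neg (by simp [hb])]
    have h0 : ((0 : Int) == 2) = false := by decide
    have h0' : ((0 : Int) == 3) = false := by decide
    simp only [h0, h0', Bool.or_false]
    rw [scan_run rest c 1 false false hpw]
    have hgoal : ∀ k : Int,
        (false || decide ((1 : Int) + (rest.count c : Int) = k) || decide (∃ d ∈ rest, d ≠ c ∧ (rest.count d : Int) = k))
        = decide (∃ d ∈ c :: rest, ((c :: rest).count d : Int) = k) := by
      intro k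
      rw [Bool.false_or, Bool.eq_iff_iff]
      simp only [Bool.or_eq_true, decide_eq_true_eq]
      constructor
      · rintro (h | ⟨d, hd, hne, hk⟩)
        · refine ⟨c, List.mem_cons_self, ?_⟩
          rw [List.count_cons_self]; push_cast; omega
        · exact ⟨d, List.mem_cons_of_mem _ hd, by rwa [List.count_cons_of_ne (fun h => hne h.symm)]⟩
      · rintro ⟨d, hd, hk⟩
        by_cases hdc : d = c
        · subst hdc; left; rw [List.count_cons_self] at hk; push_cast at hk ⊢; omega
        · rcases List.mem_cons.mp hd with h | h
          · exact absurd h hdc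
          · right; exact ⟨d, h, hdc, by rwa [List.count_cons_of_ne (fun h => hdc h.symm)] at hk⟩
    rw [Prod.mk.injEq]
    exact ⟨hgoal 2, hgoal 3⟩

theorem fold_eq (data : List String) : ∀ (acc : Int × Int),
    data.foldl (fun (acc : Int × Int) line =>
      let st := (PySem.List.sorted line.toList (fun c => c) false).foldl bStep (none, 0, false, false)
      let has2 := st.2.2.1 || (st.2.1 == 2)
      let has3 := st.2.2.2 || (st.2.1 == 3)
      (if has2 then acc.1 + 1 else acc.1, if has3 then acc.2 + 1 else acc.2)) acc
    = data.foldl (fun (acc : Int × Int) line =>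
      let dt := process_line1 line
      (if dt.1 then acc.1 + 1 else acc.1, if dt.2 then acc.2 + 1 else acc.2)) acc := by
  induction data with
  | nil => intro acc; rfl
  | cons line rest ih =>
    intro acc
    simp only [List.foldl_cons]
    have hl := lineFlags_eq line
    have h1 : (((PySem.List.sorted line.toList (fun c => c) false).foldl bStep (none, 0, false, false)).2.2.1 ||
        (((PySem.List.sorted line.toList (fun c => c) false).foldl bStep (none, 0, false, false)).2.1 == 2))
        = (process_line1 line).1 := congrArg Prod.fst hl
    have h2 : (((PySem.List.sorted line.toList (fun c => c) false).foldl bStep (none, 0, false, false)).2.2.2 ||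
        (((PySem.List.sorted line.toList (fun c => c) false).foldl bStep (none, 0, false, false)).2.1 == 3))
        = (process_line1 line).2 := congrArg Prod.snd hl
    rw [h1, h2]
    exact ih _

-- ===== VERDICT (by name: the statement is the Claim_ definition above) =====
theorem process_data1_spec : Claim_equal_process_data1 := by
  intro data _
  show process_data1 data = process_data1_alt data
  simp only [process_data1, process_data1_alt]
  rw [fold_eq]
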